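-- pv_equiv track=rewrite | github.com/adityar2309/pythonlearnv2 | PDSA/week 10/ppa2.py | PrefixMatch
-- ===== SOURCE A (Python) =====
-- def kmp_fail(p):
--     m = len(p)
--     fail = [0 for i in range(m)]
--     j,k = 1,0
--     while j < m:
--         if p[j] == p[k]:
--             fail[j] = k+1
--             j,k = j+1,k+1
--         elif k > 0:
--             k = fail[k-1]
--         else:
--             j = j+1
--     return(fail)
--
-- def PrefixMatch(s):
--     res=[]
--     if len(s)==0:
--         return res
--     m = kmp_fail(s)
--     for i in m:
--         if i != 0:
--             res.append(s[:i])
--     ss = list(set(res))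
--     return ss
-- ===== SOURCE B (Python) =====
-- def PrefixMatch(s):
--     res = []
--     if len(s) == 0:
--         return res
--     for j in range(1, len(s)):
--         for k in range(j, 0, -1):
--             if s[:k] == s[j - k + 1:j + 1]:
--                 res.append(s[:k])
--                 break
--     return list(set(res))
-- ===== Notes on version B (the rewrite author's own statement) =====
-- stated objective: simpler
-- what changed: Drops the kmp_fail helper and its stateful failure-array while-loop entirely: for each position j, B finds the longest proper border of s[:j+1] directly by one naive descending scan over candidate lengths, appending s[:k] for the first (longest) match; the final list(set(res)) is unchanged.
import Mathlib
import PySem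

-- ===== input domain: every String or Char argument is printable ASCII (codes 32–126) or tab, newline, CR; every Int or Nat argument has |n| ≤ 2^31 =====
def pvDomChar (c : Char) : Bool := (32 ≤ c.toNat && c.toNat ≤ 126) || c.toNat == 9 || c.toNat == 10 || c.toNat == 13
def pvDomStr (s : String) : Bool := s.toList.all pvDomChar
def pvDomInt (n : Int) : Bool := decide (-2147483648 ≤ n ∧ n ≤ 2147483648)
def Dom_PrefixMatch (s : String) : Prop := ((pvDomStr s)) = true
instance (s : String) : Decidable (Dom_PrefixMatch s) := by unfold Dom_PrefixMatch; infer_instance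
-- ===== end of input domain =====

-- B replaces the fused KMP failure-function loop by an independent naive descending
-- border scan per position (objective: simpler — no helper, no mutable failure array).
-- Both Pythons end with list(set(res)); the output is a set listing (Set.ofList here).

-- ===== PORT A =====
-- while-loop of kmp_fail, made total with fuel 2*m (the loop makes fewer than 2*m
-- iterations; the fuel only makes the same computation total).  j, k and the fail
-- entries are provably nonnegative in-range Python ints, so Nat with getD/set is exact.
def kmpFailGo (p : List Char) (m : ℕ) (fail : List ℕ) (j k : ℕ) : ℕ → List ℕ
  | 0 => fail
  | fuel + 1 =>
    if j < m then
      if p.getD j ' ' = p.getD k ' ' then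
        kmpFailGo p m (fail.set j (k + 1)) (j + 1) (k + 1) fuel
      else if 0 < k then
        kmpFailGo p m fail j (fail.getD (k - 1) 0) fuel
      else
        kmpFailGo p m fail (j + 1) k fuel
    else fail

def kmp_fail (p : List Char) : List ℕ :=
  kmpFailGo p p.length (List.replicate p.length 0) 1 0 (2 * p.length)

def PrefixMatch (s : String) : List String :=
  let t := s.toList
  if t.length = 0 then []
  else
    let res := (kmp_fail t).foldl
      (fun res i => if i ≠ 0 then res ++ [String.ofList (t.take i)] else res) []
    PySem.Set.ofList res   -- ss = list(set(res)); the output is compared as a set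

-- ===== PORT B =====
-- inner loop 'for k in range(j, 0, -1): if s[:k] == s[j-k+1:j+1]: …; break'
-- (k+1 is the current Python k; since k+1 ≤ j the Nat subtraction j-(k+1)+1 is exact)
def borderScan (t : List Char) (j : ℕ) : ℕ → Option ℕ
  | 0 => none
  | k + 1 =>
    if t.take (k + 1) = (t.take (j + 1)).drop (j - (k + 1) + 1) then some (k + 1)
    else borderScan t j k

def PrefixMatch_alt (s : String) : List String :=
  let t := s.toList
  if t.length = 0 then []
  else
    let res := (List.range' 1 (t.length - 1)).foldl
      (fun res j =>
        match borderScan t j j with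
        | some k => res ++ [String.ofList (t.take k)]
        | none => res) []
    PySem.Set.ofList res   -- list(set(res))

-- ===== PRECONDITION & SPEC =====
def Spec_PrefixMatch (s : String) (out : List String) : Prop := out = PrefixMatch_alt s
instance (s : String) (out : List String) : Decidable (Spec_PrefixMatch s out) := by unfold Spec_PrefixMatch; infer_instance

-- ===== CLAIM (what is proved, stated in full; the proofs are below) =====
def Claim_equal_PrefixMatch : Prop := ∀ (s : String), Dom_PrefixMatch s → Spec_PrefixMatch s (PrefixMatch s)

-- ===== LEMMAS AND PROOFS =====

-- "t.take k is a (not necessarily proper) border of t.take L"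
abbrev IsBord (t : List Char) (L k : ℕ) : Prop :=
  t.take k = (t.take L).drop (L - k)

-- length of the longest proper border of t.take L (0 if none) — what B's scan finds
def nb (t : List Char) (L : ℕ) : ℕ :=
  Nat.findGreatest (fun k => IsBord t L k) (L - 1)

theorem isBord_zero (t : List Char) (L : ℕ) : IsBord t L 0 := by
  simp [IsBord, List.drop_eq_nil_of_le (List.length_take_le L t)]

theorem nb_spec (t : List Char) (L : ℕ) : IsBord t L (nb t L) :=
  Nat.findGreatest_spec (Nat.zero_le _) (isBord_zero t L)

theorem nb_le (t : List Char) (L : ℕ) : nb t L ≤ L - 1 :=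
  Nat.findGreatest_le _

theorem nb_ge (t : List Char) {L b : ℕ} (hb : b ≤ L - 1) (h : IsBord t L b) : b ≤ nb t L :=
  Nat.le_findGreatest hb h

theorem nb_one (t : List Char) : nb t 1 = 0 := by
  have := nb_le t 1; omega

-- two borders of the same prefix are comparable: the shorter is a border of the longer
theorem isBord_compare (t : List Char) {L b k : ℕ} (hbk : b ≤ k) (hkL : k ≤ L)
    (hb : IsBord t L b) (hk : IsBord t L k) : IsBord t k b := by
  unfold IsBord at *
  rw [hb, hk, List.drop_drop]; congr 1; omega

-- a border of a border is a border
theorem isBord_trans (t : List Char) {L b k : ℕ} (hbk : b ≤ k) (hkL : k ≤ L)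
    (hb : IsBord t k b) (hk : IsBord t L k) : IsBord t L b := by
  unfold IsBord at *
  rw [hb, hk, List.drop_drop]; congr 1; omega

theorem take_snoc (t : List Char) {k : ℕ} (h : k < t.length) :
    t.take (k + 1) = t.take k ++ [t[k]] := by
  rw [List.take_add_one, List.getElem?_eq_getElem h]; rfl

-- extending a border by one character
theorem isBord_succ_iff (t : List Char) {L k : ℕ} (hk : k ≤ L) (hL : L < t.length) :
    IsBord t (L + 1) (k + 1) ↔ (IsBord t L k ∧ t.getD k ' ' = t.getD L ' ') := by
  have hkn : k < t.length := lt_of_le_of_lt hk hL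
  have hlen : L - k ≤ (t.take L).length := by
    rw [List.length_take]; omega
  unfold IsBord
  rw [take_snoc t hkn, take_snoc t hL, show L + 1 - (k + 1) = L - k by omega,
    List.drop_append_of_le_length hlen, List.append_singleton_inj,
    List.getD_eq_getElem t ' ' hkn, List.getD_eq_getElem t ' ' hL]

theorem nb_succ_le (t : List Char) {L : ℕ} (hL : L < t.length) :
    nb t (L + 1) ≤ nb t L + 1 := by
  cases hb : nb t (L + 1) with
  | zero => omega
  | succ c =>
    have hP := nb_spec t (L + 1)
    rw [hb] at hP
    have hcle : c + 1 ≤ L := by have := nb_le t (L + 1); omega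
    obtain ⟨hPc, -⟩ := (isBord_succ_iff t (by omega) hL).mp hP
    have := nb_ge t (by omega) hPc
    omega

-- the KMP loop invariant, pushed through the fuelled loop
theorem kmpFailGo_correct (t : List Char) :
    ∀ (fuel : ℕ) (fail : List ℕ) (j k : ℕ),
    fail.length = t.length → 1 ≤ j → j ≤ t.length → k < j →
    (∀ i < j, fail.getD i 0 = nb t (i + 1)) →
    (∀ i, j ≤ i → i < t.length → fail.getD i 0 = 0) →
    IsBord t j k →
    (j < t.length → nb t (j + 1) ≤ k + 1) →
    2 * (t.length - j) + k + 1 ≤ fuel →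
    ∀ i < t.length, (kmpFailGo t t.length fail j k fuel).getD i 0 = nb t (i + 1) := by
  intro fuel
  induction fuel with
  | zero => intro fail j k _ _ _ _ _ _ _ _ hfuel; omega
  | succ fuel ih =>
    intro fail j k hlen hj1 hjm hkj h3 h4 h5 h6 hfuel i hi
    simp only [kmpFailGo]
    by_cases hjn : j < t.length
    · rw [if_pos hjn]
      by_cases hc : t.getD j ' ' = t.getD k ' '
      · rw [if_pos hc]
        have hext : IsBord t (j + 1) (k + 1) :=
          (isBord_succ_iff t (le_of_lt hkj) hjn).mpr ⟨h5, hc.symm⟩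
        have hnbj : nb t (j + 1) = k + 1 := by
          have hub := h6 hjn
          have hlb : k + 1 ≤ nb t (j + 1) := nb_ge t (by omega) hext
          omega
        apply ih
        · rw [List.length_set]; exact hlen
        · omega
        · omega
        · omega
        · intro i' hi'
          by_cases hij : i' = j
          · subst hij
            have : (fail.set i' (k + 1)).getD i' 0 = k + 1 := by
              simp [List.getD_eq_getElem?_getD, List.getElem?_set_self (show i' < fail.length by omega)]
            rw [this, hnbj]
          · have : (fail.set j (k + 1)).getD i' 0 = fail.getD i' 0 := by
              simp [List.getD_eq_getElem?_getD, List.getElem?_set_ne (show j ≠ i' by omega)]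
            rw [this]; exact h3 i' (by omega)
        · intro i' hji' hi'n
          have : (fail.set j (k + 1)).getD i' 0 = fail.getD i' 0 := by
            simp [List.getD_eq_getElem?_getD, List.getElem?_set_ne (show j ≠ i' by omega)]
          rw [this]; exact h4 i' (by omega) hi'n
        · exact hext
        · intro hj1n
          have := nb_succ_le t hj1n
          omega
        · omega
        · exact hi
      · rw [if_neg hc]
        by_cases hk0 : 0 < k
        · rw [if_pos hk0]
          have hkm1 : fail.getD (k - 1) 0 = nb t k := by
            have := h3 (k - 1) (by omega)
            rwa [show k - 1 + 1 = k by omega] at this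
          have hnbk_le : nb t k ≤ k - 1 := nb_le t k
          rw [hkm1]
          apply ih
          · exact hlen
          · omega
          · omega
          · omega
          · exact h3
          · exact h4
          · exact isBord_trans t (by omega) (le_of_lt hkj) (nb_spec t k) h5
          · intro _
            have hub := h6 hjn
            by_cases hbk : nb t (j + 1) = k + 1
            · exfalso
              have hP := nb_spec t (j + 1)
              rw [hbk] at hP
              exact hc (((isBord_succ_iff t (le_of_lt hkj) hjn).mp hP).2.symm)
            · cases hb : nb t (j + 1) with
              | zero => omega
              | succ c =>
                have hP := nb_spec t (j + 1)
                rw [hb] at hP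
                obtain ⟨hPc, -⟩ := (isBord_succ_iff t (show c ≤ j by omega) hjn).mp hP
                have hPck : IsBord t k c := isBord_compare t (by omega) (le_of_lt hkj) hPc h5
                have := nb_ge t (by omega) hPck
                omega
          · omega
          · exact hi
        · rw [if_neg hk0]
          have hk0' : k = 0 := by omega
          have hnbj : nb t (j + 1) = 0 := by
            have hub := h6 hjn
            by_contra hne
            have h1 : nb t (j + 1) = 1 := by omega
            have hP := nb_spec t (j + 1)
            rw [h1] at hP
            have := ((isBord_succ_iff t (show 0 ≤ j by omega) hjn).mp hP).2
            exact hc (hk0' ▸ this.symm)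
          apply ih
          · exact hlen
          · omega
          · omega
          · omega
          · intro i' hi'
            by_cases hij : i' = j
            · subst hij
              rw [h4 i' (by omega) hjn, hnbj]
            · exact h3 i' (by omega)
          · intro i' hji' hi'n; exact h4 i' (by omega) hi'n
          · exact hk0' ▸ isBord_zero t (j + 1)
          · intro hj1n
            have := nb_succ_le t hj1n
            omega
          · omega
          · exact hi
    · rw [if_neg hjn]
      exact h3 i (by omega)

theorem kmp_fail_getD (t : List Char) (h : 1 ≤ t.length) :
    ∀ i < t.length, (kmp_fail t).getD i 0 = nb t (i + 1) := by
  unfold kmp_fail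
  apply kmpFailGo_correct t
  · simp
  · omega
  · omega
  · omega
  · intro i hi
    have hi0 : i = 0 := by omega
    subst hi0
    simp [nb_one]
  · intro i _ _; simp
  · exact isBord_zero t 1
  · intro _
    have := nb_le t 2; omega
  · omega

theorem kmpFailGo_length (t : List Char) :
    ∀ (fuel : ℕ) (fail : List ℕ) (j k : ℕ),
    (kmpFailGo t t.length fail j k fuel).length = fail.length := by
  intro fuel
  induction fuel with
  | zero => intro fail j k; rfl
  | succ fuel ih =>
    intro fail j k
    simp only [kmpFailGo]
    split_ifs with h1 h2 h3
    · rw [ih, List.length_set]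
    · rw [ih]
    · rw [ih]
    · rfl

theorem list_eq_map_range (n : ℕ) (g : ℕ → ℕ) (l : List ℕ) (h : l.length = n)
    (hg : ∀ i, i < n → l.getD i 0 = g i) : l = (List.range n).map g := by
  apply List.ext_getElem <;> simp [h]
  intro i hi
  have := hg i hi
  rwa [List.getD_eq_getElem l 0 (by omega)] at this

theorem kmp_fail_eq_map (t : List Char) (h : 1 ≤ t.length) :
    kmp_fail t = (List.range t.length).map (fun i => nb t (i + 1)) := by
  apply list_eq_map_range
  · unfold kmp_fail
    rw [kmpFailGo_length, List.length_replicate]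
  · exact kmp_fail_getD t h

theorem borderScan_eq (t : List Char) (j : ℕ) :
    ∀ b, b ≤ j →
    borderScan t j b =
      (if Nat.findGreatest (fun k => IsBord t (j + 1) k) b = 0 then none
       else some (Nat.findGreatest (fun k => IsBord t (j + 1) k) b)) := by
  intro b
  induction b with
  | zero => intro _; simp [borderScan, Nat.findGreatest_zero]
  | succ b ihb =>
    intro hb
    rw [Nat.findGreatest_succ]
    simp only [borderScan]
    rw [show j - (b + 1) + 1 = j + 1 - (b + 1) by omega]
    by_cases hP : IsBord t (j + 1) (b + 1)
    · rw [if_pos hP, if_pos hP, if_neg (by omega)]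
    · rw [if_neg hP, if_neg hP]
      exact ihb (by omega)

theorem borderScan_nb (t : List Char) (j : ℕ) :
    borderScan t j j = (if nb t (j + 1) = 0 then none else some (nb t (j + 1))) := by
  have := borderScan_eq t j j (le_refl j)
  rwa [show Nat.findGreatest (fun k => IsBord t (j + 1) k) j = nb t (j + 1) by
    unfold nb; congr 1] at this

-- ===== VERDICT (by name: the statement is the Claim_ definition above) =====
theorem PrefixMatch_spec : Claim_equal_PrefixMatch := by
  intro s _
  unfold Spec_PrefixMatch PrefixMatch PrefixMatch_alt
  by_cases ht : s.toList.length = 0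
  · simp [ht]
  · simp only [ht, if_false]
    congr 1
    rw [kmp_fail_eq_map s.toList (by omega), List.foldl_map]
    obtain ⟨m, hm⟩ : ∃ m, s.toList.length = m + 1 := ⟨s.toList.length - 1, by omega⟩
    rw [hm, List.range_eq_range', List.range'_succ, Nat.add_sub_cancel]
    simp only [List.foldl_cons, Nat.zero_add, nb_one, ne_eq, not_true_eq_false, if_false]
    apply PySem.List.foldl_congr_mem
    intro acc j _
    rw [borderScan_nb]
    by_cases h0 : nb s.toList (j + 1) = 0
    · simp [h0]
    · simp [h0]
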